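-- pv_equiv track=rewrite | github.com/HKUSTGZ-MICS-LYU/VeriFlatten | src/main.py | insert_resultp_statements
-- ===== SOURCE A (Python) =====
-- def insert_resultp_statements(verilog_code: str, resultp_dict: dict) -> str:
--     """
--     将resultp_dict中的所有语句统一放在endmodule前的always @(*) 块中
--
--     Args:
--         verilog_code: 原始的Verilog代码字符串
--         resultp_dict: 包含需要插入语句的字典，格式为 {key: [statements]}
--
--     Returns:
--         str: 插入语句后的Verilog代码
--     """
--     # 将代码分割成行
--     lines = verilog_code.split('\n')
--
--     # 找到最后一个endmodule的位置
--     for i in range(len(lines) - 1, -1, -1):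
--         if 'endmodule' in lines[i]:
--             # 获取endmodule的缩进
--             indent = lines[i][:len(lines[i]) - len(lines[i].lstrip())]
--
--             # 收集所有需要插入的语句
--             all_statements = []
--             for statements in resultp_dict.values():
--                 all_statements.extend(statements)
--
--             if all_statements:
--                 # 插入always块和语句
--                 insert_lines = [
--                     f"{indent}always @(*) begin",
--                 ]
--                 # 添加所有语句，增加缩进
--                 for stmt in all_statements:
--                     insert_lines.append(f"{indent}    {stmt}")
--                 insert_lines.append(f"{indent}end")
--                 insert_lines.append("")  # 空行
--
--                 # 在endmodule前插入
--                 lines[i:i] = insert_lines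
--             break
--
--     # 合并所有行
--     return '\n'.join(lines)
-- ===== SOURCE B (Python) =====
-- def insert_resultp_statements(verilog_code: str, resultp_dict: dict) -> str:
--     """Splice the always-block directly into the raw string at the line start of
--     the last 'endmodule' occurrence, instead of splitting into lines."""
--     all_statements = [s for v in resultp_dict.values() for s in v]
--     if not all_statements:
--         return verilog_code
--     pos = verilog_code.rfind('endmodule')
--     if pos == -1:
--         return verilog_code
--     line_start = verilog_code.rfind('\n', 0, pos) + 1
--     k = line_start
--     while k < len(verilog_code) and verilog_code[k] in ' \t\r\x0b\x0c':
--         k += 1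
--     indent = verilog_code[line_start:k]
--     block = (indent + 'always @(*) begin\n'
--              + ''.join(indent + '    ' + s + '\n' for s in all_statements)
--              + indent + 'end\n\n')
--     return verilog_code[:line_start] + block + verilog_code[line_start:]
-- ===== Notes on version B (the rewrite author's own statement) =====
-- stated objective: alternative
-- what changed: B never builds a line list: it splices the always-block into the raw string at the line start of the last 'endmodule' found with rfind, instead of A's split-into-lines, reverse index scan and re-join.
import Mathlib
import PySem

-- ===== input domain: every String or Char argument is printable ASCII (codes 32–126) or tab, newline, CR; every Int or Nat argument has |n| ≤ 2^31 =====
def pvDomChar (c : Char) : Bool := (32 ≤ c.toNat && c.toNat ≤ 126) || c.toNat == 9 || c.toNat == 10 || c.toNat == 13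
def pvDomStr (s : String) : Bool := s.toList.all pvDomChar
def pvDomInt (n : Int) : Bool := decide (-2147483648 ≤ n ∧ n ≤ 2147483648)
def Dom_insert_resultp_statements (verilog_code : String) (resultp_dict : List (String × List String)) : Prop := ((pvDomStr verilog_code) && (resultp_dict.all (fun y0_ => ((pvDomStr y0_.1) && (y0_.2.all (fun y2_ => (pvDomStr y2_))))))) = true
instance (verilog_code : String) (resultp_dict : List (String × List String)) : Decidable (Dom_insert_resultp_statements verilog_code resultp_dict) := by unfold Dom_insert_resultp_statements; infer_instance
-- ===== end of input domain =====

-- B rewrites A's line-splitting reverse scan as a raw-string splice at rfind('endmodule');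
-- objective: alternative (different data traversal, similar cost). Return values only; neither mutates.

-- ===== PORT A =====
-- A: split into lines, scan indices len-1 .. 0 for a line containing 'endmodule', splice the
-- always-block into the line list there, join with '\n'.
def pvScanA (lines : List (List Char)) : Nat → Option Nat
  | i =>
    if PySem.Chars.isIn "endmodule".toList (lines.getD i []) then some i
    else if h : i = 0 then none
    else pvScanA lines (i - 1)

def insert_resultp_statements (verilog_code : String) (resultp_dict : List (String × List String)) : String :=
  let cs := verilog_code.toList
  let lines := PySem.Chars.splitOn cs ['\n']
  match pvScanA lines (lines.length - 1) with
  | none => String.ofList (PySem.Chars.join ['\n'] lines)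
  | some i =>
    let line := lines.getD i []
    let indent := line.take (line.length - (PySem.Chars.lstrip line).length)
    let all_statements := ((PySem.Dict.ofList resultp_dict).values).foldl (fun acc v => acc ++ v) []
    if all_statements.isEmpty then String.ofList (PySem.Chars.join ['\n'] lines)
    else
      let insert_lines :=
        [indent ++ "always @(*) begin".toList]
          ++ all_statements.map (fun stmt => indent ++ "    ".toList ++ stmt.toList)
          ++ [indent ++ "end".toList, []]
      String.ofList (PySem.Chars.join ['\n'] (lines.take i ++ insert_lines ++ lines.drop i))

-- ===== PORT B =====
-- B: no line list — find the last 'endmodule' in the raw string, back up to its line start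
-- with rfind('\n'), read the indent there, and splice the ready-made block text in place.
def insert_resultp_statements_alt (verilog_code : String) (resultp_dict : List (String × List String)) : String :=
  let all_statements := ((PySem.Dict.ofList resultp_dict).values).flatMap (fun v => v)
  if all_statements = [] then verilog_code
  else
    let cs := verilog_code.toList
    let pos := PySem.Chars.rfind cs "endmodule".toList
    if pos = -1 then verilog_code
    else
      let line_start := (PySem.Chars.rfindFrom cs ['\n'] 0 (some pos) + 1).toNat
      let indent := (cs.drop line_start).takeWhile (fun c => c ∈ [' ', '\t', '\r', '\x0b', '\x0c'])
      let block :=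
        indent ++ "always @(*) begin\n".toList
          ++ all_statements.flatMap (fun s => indent ++ "    ".toList ++ s.toList ++ ['\n'])
          ++ indent ++ "end\n\n".toList
      String.ofList (cs.take line_start ++ block ++ cs.drop line_start)

-- ===== PRECONDITION & SPEC =====
def Spec_insert_resultp_statements (verilog_code : String) (resultp_dict : List (String × List String)) (out : String) : Prop := out = insert_resultp_statements_alt verilog_code resultp_dict
instance (verilog_code : String) (resultp_dict : List (String × List String)) (out : String) : Decidable (Spec_insert_resultp_statements verilog_code resultp_dict out) := by unfold Spec_insert_resultp_statements; infer_instance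

-- ===== CLAIM (what is proved, stated in full; the proofs are below) =====
def Claim_equal_insert_resultp_statements : Prop := ∀ (verilog_code : String) (resultp_dict : List (String × List String)), Dom_insert_resultp_statements verilog_code resultp_dict → Spec_insert_resultp_statements verilog_code resultp_dict (insert_resultp_statements verilog_code resultp_dict)

-- ===== LEMMAS AND PROOFS =====

lemma pv_splitOn_go_eq (c : Char) (l : List Char) (fuel : Nat) (cur : List Char)
    (acc : List (List Char)) (h : l.length < fuel) :
    PySem.Chars.splitOn.go [c] fuel l cur acc
      = acc.reverse ++ List.modifyHead (cur.reverse ++ ·) (List.splitOn c l) := by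
  induction l generalizing fuel cur acc with
  | nil =>
    cases fuel with
    | zero => omega
    | succ f => simp [PySem.Chars.splitOn.go, List.splitOn]
  | cons d rest ih =>
    cases fuel with
    | zero => omega
    | succ f =>
      rw [PySem.Chars.splitOn.go]
      by_cases hd : d = c
      · subst hd
        simp only [List.isPrefixOf, beq_self_eq_true, Bool.true_and, if_pos]
        show PySem.Chars.splitOn.go [d] f (List.drop [d].length (d :: rest)) [] (cur.reverse :: acc) = _
        simp only [List.length_cons, List.length_nil, Nat.zero_add, List.drop_succ_cons,
          List.drop_zero]
        rw [ih f [] _ (by simpa using Nat.lt_of_succ_lt_succ h)]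
        simp only [List.splitOn, List.splitOnP_cons, beq_self_eq_true, if_pos, List.reverse_cons,
          List.reverse_nil, List.nil_append, List.append_assoc, List.singleton_append]
        simp [List.modifyHead]
        cases List.splitOnP (fun x => x == d) rest <;> rfl
      · have hp : ([c].isPrefixOf (d :: rest)) = false := by
          simp [List.isPrefixOf]; exact fun h' => (hd h'.symm).elim
        rw [if_neg (by simp [hp])]
        rw [ih f (d :: cur) acc (by simpa using Nat.lt_of_succ_lt_succ h)]
        simp only [List.splitOn, List.splitOnP_cons, beq_iff_eq, if_neg hd]
        rw [List.modifyHead_modifyHead]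
        have hfun : (fun x : List Char => (d :: cur).reverse ++ x)
            = ((fun x => cur.reverse ++ x) ∘ List.cons d) := by
          funext x; simp
        rw [hfun]

lemma pv_splitOn_eq (cs : List Char) (c : Char) :
    PySem.Chars.splitOn cs [c] = List.splitOn c cs := by
  rw [PySem.Chars.splitOn, pv_splitOn_go_eq c cs (cs.length + 1) [] [] (by omega)]
  simp only [List.reverse_nil, List.nil_append]
  exact congrFun List.modifyHead_id _

lemma pv_prefix_append_cons {P a b : List Char} {x : Char} (hx : x ∉ P)
    (h : P <+: a ++ x :: b) : P <+: a := by
  induction a generalizing P with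
  | nil =>
    cases P with
    | nil => exact List.nil_prefix
    | cons p P' =>
      obtain ⟨t, ht⟩ := h
      simp only [List.nil_append, List.cons_append] at ht
      cases ht
      exact (hx List.mem_cons_self).elim
  | cons c a' ih =>
    cases P with
    | nil => exact List.nil_prefix
    | cons p P' =>
      obtain ⟨t, ht⟩ := h
      simp only [List.cons_append] at ht
      obtain ⟨rfl, ht'⟩ := List.cons.inj ht
      have : P' <+: a' := ih (fun hm => hx (List.mem_cons_of_mem _ hm)) ⟨t, ht'⟩
      exact List.cons_prefix_cons.mpr ⟨rfl, this⟩

lemma pv_infix_iff_drop (P s : List Char) : P <:+: s ↔ ∃ j, P <+: s.drop j := by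
  rw [← PySem.Chars.isIn_iff_infix]
  exact (PySem.Chars.exists_prefix_drop_iff_isIn P s).symm

lemma pv_infix_append_cons {P a b : List Char} {x : Char} (hx : x ∉ P)
    (h : P <:+: a ++ x :: b) : P <:+: a ∨ P <:+: b := by
  obtain ⟨j, hj⟩ := (pv_infix_iff_drop _ _).mp h
  by_cases hja : j ≤ a.length
  · left
    rw [List.drop_append_of_le_length hja] at hj
    exact ((pv_infix_iff_drop _ _).mpr ⟨j, pv_prefix_append_cons hx hj⟩)
  · right
    have : (a ++ x :: b).drop j = b.drop (j - a.length - 1) := by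
      rw [List.drop_append]
      have h1 : j - a.length = (j - a.length - 1) + 1 := by omega
      rw [List.drop_eq_nil_of_le (by omega), h1, List.drop_succ_cons]
      simp
    rw [this] at hj
    exact (pv_infix_iff_drop _ _).mpr ⟨_, hj⟩

lemma pv_infix_intercalate {P : List Char} {x : Char} (hx : x ∉ P) :
    ∀ (ls : List (List Char)), ls ≠ [] → P <:+: [x].intercalate ls → ∃ l ∈ ls, P <:+: l := by
  intro ls
  induction ls with
  | nil => intro h; exact absurd rfl h
  | cons l t ih =>
    intro _ h
    cases t with
    | nil =>
      refine ⟨l, List.mem_cons_self, ?_⟩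
      simpa [List.intercalate] using h
    | cons l2 t2 =>
      have hic : [x].intercalate (l :: l2 :: t2) = l ++ x :: [x].intercalate (l2 :: t2) := by
        simp [List.intercalate, List.intersperse]
      rw [hic] at h
      rcases pv_infix_append_cons hx h with h1 | h2
      · exact ⟨l, List.mem_cons_self, h1⟩
      · obtain ⟨l', hm, hl'⟩ := ih (by simp) h2
        exact ⟨l', List.mem_cons_of_mem _ hm, hl'⟩

lemma pv_intercalate_append {x : Char} :
    ∀ (xs ys : List (List Char)), xs ≠ [] → ys ≠ [] →
    [x].intercalate (xs ++ ys) = [x].intercalate xs ++ x :: [x].intercalate ys := by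
  intro xs
  induction xs with
  | nil => intro ys h; exact absurd rfl h
  | cons l t ih =>
    intro ys _ hys
    cases t with
    | nil =>
      cases ys with
      | nil => exact absurd rfl hys
      | cons y yt => simp [List.intercalate, List.intersperse]
    | cons l2 t2 =>
      have h1 : [x].intercalate ((l :: l2 :: t2) ++ ys) = l ++ x :: [x].intercalate ((l2 :: t2) ++ ys) := by
        simp [List.intercalate]
      have h2 : [x].intercalate (l :: l2 :: t2) = l ++ x :: [x].intercalate (l2 :: t2) := by
        simp [List.intercalate]
      rw [h1, h2, ih ys (by simp) hys]
      simp

lemma pv_mem_infix_intercalate {x : Char} :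
    ∀ (ls : List (List Char)) (l : List Char), l ∈ ls → l <:+: [x].intercalate ls := by
  intro ls
  induction ls with
  | nil => intro l h; simp at h
  | cons a t ih =>
    intro l hm
    cases t with
    | nil => simp at hm; subst hm; simp [List.intercalate]
    | cons l2 t2 =>
      have hic : [x].intercalate (a :: l2 :: t2) = a ++ x :: [x].intercalate (l2 :: t2) := by
        simp [List.intercalate, List.intersperse]
      rcases List.mem_cons.mp hm with rfl | hm'
      · exact hic ▸ ((List.prefix_append l _).isInfix)
      · have := ih l hm'
        rw [hic]
        refine this.trans ?_
        exact ((List.suffix_cons x _).trans (List.suffix_append a _)).isInfix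

lemma pv_splitOn_not_mem (c : Char) :
    ∀ (cs : List Char), ∀ l ∈ List.splitOn c cs, c ∉ l := by
  intro cs
  induction cs with
  | nil => intro l hl; simp [List.splitOn] at hl; subst hl; simp
  | cons d rest ih =>
    intro l hl
    simp only [List.splitOn, List.splitOnP_cons, beq_iff_eq] at hl ih
    by_cases hd : d = c
    · rw [if_pos (by simpa using hd)] at hl
      rcases List.mem_cons.mp hl with rfl | hm
      · simp
      · exact ih l hm
    · rw [if_neg (by simpa using hd)] at hl
      obtain ⟨h1, t1, ht⟩ := List.exists_cons_of_ne_nil (List.splitOnP_ne_nil (fun x => x == c) rest)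
      rw [ht] at hl
      simp only [List.modifyHead_cons] at hl
      rcases List.mem_cons.mp hl with rfl | hm
      · intro hmem
        rcases List.mem_cons.mp hmem with rfl | hm2
        · exact hd rfl
        · exact ih _ (ht ▸ List.mem_cons_self) hm2
      · exact ih l (ht ▸ List.mem_cons_of_mem _ hm)

lemma pv_rfind_go_spec (s sub : List Char) (j : Nat) :
    (PySem.Chars.rfind.go s sub j = -1 ∧ ∀ j' ≤ j, ¬ sub <+: s.drop j')
    ∨ (∃ k : Nat, PySem.Chars.rfind.go s sub j = (k : Int) ∧ k ≤ j ∧ sub <+: s.drop k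
        ∧ ∀ j' ≤ j, sub <+: s.drop j' → j' ≤ k) := by
  induction j with
  | zero =>
    by_cases h : sub.isPrefixOf s
    · right
      exact ⟨0, by simp [PySem.Chars.rfind.go, h], le_refl 0,
        by simpa using List.isPrefixOf_iff_prefix.mp h, fun j' hj' _ => hj'⟩
    · left
      refine ⟨by simp [PySem.Chars.rfind.go, h], ?_⟩
      intro j' hj' hp
      interval_cases j'
      exact h (List.isPrefixOf_iff_prefix.mpr (by simpa using hp))
  | succ n ih =>
    by_cases h : sub.isPrefixOf (s.drop (n + 1))
    · right
      refine ⟨n + 1, ?_, le_refl _, List.isPrefixOf_iff_prefix.mp h, fun j' hj' _ => hj'⟩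
      simp [PySem.Chars.rfind.go, h]
    · have hstep : PySem.Chars.rfind.go s sub (n + 1) = PySem.Chars.rfind.go s sub n := by
        simp [PySem.Chars.rfind.go, h]
      have hnot : ¬ sub <+: s.drop (n + 1) :=
        fun hp => h (List.isPrefixOf_iff_prefix.mpr hp)
      rcases ih with ⟨he, hall⟩ | ⟨k, he, hk, hp, hmax⟩
      · left
        refine ⟨hstep ▸ he, ?_⟩
        intro j' hj' hp
        rcases Nat.lt_or_ge j' (n + 1) with hlt | hge
        · exact hall j' (by omega) hp
        · have : j' = n + 1 := by omega
          exact hnot (this ▸ hp)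
      · right
        refine ⟨k, hstep ▸ he, by omega, hp, ?_⟩
        intro j' hj' hpp
        rcases Nat.lt_or_ge j' (n + 1) with hlt | hge
        · exact hmax j' (by omega) hpp
        · have : j' = n + 1 := by omega
          exact absurd (this ▸ hpp) hnot

lemma pv_rfind_spec (s sub : List Char) (hne : sub ≠ []) :
    (PySem.Chars.rfind s sub = -1 ∧ ¬ sub <:+: s)
    ∨ (∃ k : Nat, PySem.Chars.rfind s sub = (k : Int) ∧ sub <+: s.drop k
        ∧ ∀ j : Nat, sub <+: s.drop j → j ≤ k) := by
  have hbig : ∀ j : Nat, sub <+: s.drop j → j ≤ s.length := by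
    intro j hp
    by_contra hgt
    rw [List.drop_eq_nil_of_le (by omega)] at hp
    exact hne (List.prefix_nil.mp hp)
  rcases pv_rfind_go_spec s sub s.length with ⟨he, hall⟩ | ⟨k, he, _, hp, hmax⟩
  · left
    refine ⟨he, fun hinf => ?_⟩
    obtain ⟨j, hj⟩ := (PySem.Chars.exists_prefix_drop_iff_isIn sub s).mpr
      ((PySem.Chars.isIn_iff_infix sub s).mpr hinf)
    exact hall j (hbig j hj) hj
  · right
    exact ⟨k, he, hp, fun j hj => hmax j (hbig j hj) hj⟩

lemma pv_scanA_spec (P : List Char) (lines : List (List Char)) (j : Nat)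
    (scan : List (List Char) → Nat → Option Nat)
    (hscan : ∀ ls i, scan ls i = if PySem.Chars.isIn P (ls.getD i []) then some i
      else if i = 0 then none else scan ls (i - 1)) :
    (scan lines j = none ∧ ∀ i ≤ j, PySem.Chars.isIn P (lines.getD i []) = false)
    ∨ (∃ i, scan lines j = some i ∧ i ≤ j ∧ PySem.Chars.isIn P (lines.getD i []) = true
        ∧ ∀ i', i < i' → i' ≤ j → PySem.Chars.isIn P (lines.getD i' []) = false) := by
  induction j with
  | zero =>
    by_cases h : PySem.Chars.isIn P (lines.getD 0 [])
    · right; exact ⟨0, by rw [hscan, if_pos h], le_refl 0, by simpa using h, by omega⟩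
    · left
      refine ⟨by rw [hscan, if_neg h]; rfl, ?_⟩
      intro i hi; interval_cases i; simpa using h
  | succ n ih =>
    by_cases h : PySem.Chars.isIn P (lines.getD (n + 1) [])
    · right
      exact ⟨n + 1, by rw [hscan, if_pos h], le_refl _, by simpa using h, by omega⟩
    · have hstep : scan lines (n + 1) = scan lines n := by
        conv_lhs => rw [hscan]
        rw [if_neg h, if_neg (Nat.succ_ne_zero n)]
        norm_num
      rcases ih with ⟨he, hall⟩ | ⟨i, he, hi, hc, hmax⟩
      · left
        refine ⟨hstep ▸ he, ?_⟩
        intro i hi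
        rcases Nat.lt_or_ge i (n + 1) with hlt | hge
        · exact hall i (by omega)
        · have : i = n + 1 := by omega
          subst this; simpa using h
      · right
        refine ⟨i, hstep ▸ he, by omega, hc, ?_⟩
        intro i' hlt hle
        rcases Nat.lt_or_ge i' (n + 1) with hlt' | hge
        · exact hmax i' hlt (by omega)
        · have : i' = n + 1 := by omega
          subst this; simpa using h

lemma pv_takeWhile_append_left {p : Char → Bool} {l : List Char} (m : List Char)
    (h : ∃ c ∈ l, p c = false) : (l ++ m).takeWhile p = l.takeWhile p := by
  induction l with
  | nil => obtain ⟨c, hc, _⟩ := h; simp at hc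
  | cons a t ih =>
    by_cases ha : p a
    · simp only [List.cons_append, List.takeWhile_cons, ha, if_pos]
      obtain ⟨c, hc, hpc⟩ := h
      rcases List.mem_cons.mp hc with rfl | hm
      · rw [ha] at hpc; simp at hpc
      · rw [ih ⟨c, hm, hpc⟩]
    · simp [Bool.of_not_eq_true ha]

lemma pv_takeWhile_congr {p q : Char → Bool} :
    ∀ (l : List Char), (∀ c ∈ l, p c = q c) → l.takeWhile p = l.takeWhile q := by
  intro l
  induction l with
  | nil => intro _; rfl
  | cons a t ih =>
    intro h
    have ha := h a List.mem_cons_self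
    simp only [List.takeWhile_cons, ha]
    by_cases hq : q a <;> simp [hq, ih (fun c hc => h c (List.mem_cons_of_mem _ hc))]

lemma pv_indent_eq (line : List Char) :
    line.take (line.length - (PySem.Chars.lstrip line).length)
      = line.takeWhile PySem.Chars.isspace := by
  have hlen : line.length - (List.dropWhile PySem.Chars.isspace line).length
      = (List.takeWhile PySem.Chars.isspace line).length := by
    have := List.takeWhile_append_dropWhile (p := PySem.Chars.isspace) (l := line)
    have hl := congrArg List.length this
    simp only [List.length_append] at hl
    omega
  rw [PySem.Chars.lstrip, hlen]
  exact (List.prefix_iff_eq_take.mp (List.takeWhile_prefix _)).symm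

lemma pv_char_eq_iff (c d : Char) : c = d ↔ c.toNat = d.toNat := by
  constructor
  · rintro rfl; rfl
  · intro h
    exact Char.ext (UInt32.toNat_inj.mp h)

lemma pv_ws_char_eq (c : Char) (hdom : pvDomChar c = true) (hne : c ≠ '\n') :
    (decide (c ∈ [' ', '\t', '\r', '\x0b', '\x0c'])) = PySem.Chars.isspace c := by
  have hd : (32 ≤ c.toNat ∧ c.toNat ≤ 126) ∨ c.toNat = 9 ∨ c.toNat = 10 ∨ c.toNat = 13 := by
    have := hdom
    simp only [pvDomChar, Bool.or_eq_true, Bool.and_eq_true, decide_eq_true_eq,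
      beq_iff_eq] at this
    tauto
  have hne10 : c.toNat ≠ 10 := fun h => hne ((pv_char_eq_iff c '\n').mpr (by simpa using h))
  rw [Bool.eq_iff_iff]
  simp only [decide_eq_true_eq, Bool.or_eq_true, Bool.and_eq_true, List.mem_cons,
    List.not_mem_nil, or_false, pv_char_eq_iff, PySem.Chars.isspace]
  have e1 : (' ').toNat = 32 := rfl
  have e2 : ('\t').toNat = 9 := rfl
  have e3 : ('\r').toNat = 13 := rfl
  have e4 : ('\x0b').toNat = 11 := rfl
  have e5 : ('\x0c').toNat = 12 := rfl
  rw [e1, e2, e3, e4, e5]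
  omega

lemma pv_block_aux (ys : List (List Char)) (e : List Char) :
    PySem.Chars.join ['\n'] (ys ++ [e, []]) ++ ['\n']
      = ys.flatMap (· ++ ['\n']) ++ e ++ ['\n', '\n'] := by
  induction ys with
  | nil =>
    rw [List.nil_append, PySem.Chars.join_cons_cons, PySem.Chars.join_singleton]
    simp
  | cons y t ih =>
    have : (y :: t) ++ [e, []] = y :: (t ++ [e, []]) := rfl
    rw [this]
    cases t with
    | nil =>
      rw [List.nil_append, PySem.Chars.join_cons_cons, PySem.Chars.join_cons_cons,
        PySem.Chars.join_singleton]
      simp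
    | cons a t2 =>
      rw [show (a :: t2) ++ [e, []] = a :: (t2 ++ [e, []]) from rfl,
        PySem.Chars.join_cons_cons]
      rw [show a :: (t2 ++ [e, []]) = (a :: t2) ++ [e, []] from rfl,
        List.append_assoc (y ++ ['\n']), ih]
      simp

lemma pv_block (ind : List Char) (stmts : List String) :
    PySem.Chars.join ['\n']
        ([ind ++ "always @(*) begin".toList]
          ++ stmts.map (fun s => ind ++ "    ".toList ++ s.toList)
          ++ [ind ++ "end".toList, []]) ++ ['\n']
      = ind ++ "always @(*) begin\n".toList
          ++ stmts.flatMap (fun s => ind ++ "    ".toList ++ s.toList ++ ['\n'])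
          ++ ind ++ "end\n\n".toList := by
  have h1 : ([ind ++ "always @(*) begin".toList]
      ++ stmts.map (fun s => ind ++ "    ".toList ++ s.toList)
      ++ [ind ++ "end".toList, []])
      = (ind ++ "always @(*) begin".toList)
          :: (stmts.map (fun s => ind ++ "    ".toList ++ s.toList) ++ [ind ++ "end".toList, []]) := by
    simp
  rw [h1]
  have h2 : ∀ (q : List Char) (rest : List (List Char)),
      PySem.Chars.join ['\n'] ((ind ++ "always @(*) begin".toList) :: q :: rest)
        = (ind ++ "always @(*) begin".toList) ++ ['\n'] ++ PySem.Chars.join ['\n'] (q :: rest) :=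
    fun q rest => PySem.Chars.join_cons_cons _ _ _ _
  cases hm : stmts.map (fun s => ind ++ "    ".toList ++ s.toList) ++ [ind ++ "end".toList, []] with
  | nil => simp at hm
  | cons q rest =>
    rw [h2 q rest, ← hm, List.append_assoc, List.append_assoc, pv_block_aux]
    have hfm : (stmts.map (fun s => ind ++ "    ".toList ++ s.toList)).flatMap (· ++ ['\n'])
        = stmts.flatMap (fun s => ind ++ "    ".toList ++ s.toList ++ ['\n']) := by
      rw [List.flatMap_map]
    rw [hfm]
    have ha : "always @(*) begin\n".toList = "always @(*) begin".toList ++ ['\n'] := by decide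
    have he : "end\n\n".toList = "end".toList ++ ['\n', '\n'] := by decide
    rw [ha, he]
    simp


lemma pv_scanA_eq (ls : List (List Char)) (j : Nat) :
    pvScanA ls j = if PySem.Chars.isIn "endmodule".toList (ls.getD j []) then some j
      else if j = 0 then none else pvScanA ls (j - 1) := by
  rw [pvScanA]
  split <;> [rfl; split <;> rfl]

lemma pv_main (code : String) (dict : List (String × List String))
    (hdom : pvDomStr code = true) :
    insert_resultp_statements code dict = insert_resultp_statements_alt code dict := by
  have hP : ('\n') ∉ "endmodule".toList := by decide
  have hPne : "endmodule".toList ≠ [] := by decide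
  have hstmts : ((PySem.Dict.ofList dict).values).foldl (fun acc v => acc ++ v) ([] : List String)
      = ((PySem.Dict.ofList dict).values).flatMap (fun v => v) := by
    simpa using PySem.List.foldl_append_eq_flatMap (fun v : List String => v)
      ((PySem.Dict.ofList dict).values) []
  set cs := code.toList with hcs_def
  have hlines : PySem.Chars.splitOn cs ['\n'] = List.splitOn '\n' cs := pv_splitOn_eq cs '\n'
  have hjoin : PySem.Chars.join ['\n'] (List.splitOn '\n' cs) = cs :=
    List.intercalate_splitOn cs '\n'
  have hofl : String.ofList cs = code := String.ofList_toList
  simp only [insert_resultp_statements, insert_resultp_statements_alt, hlines, ← hcs_def]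
  rw [hstmts]
  set P := "endmodule".toList with hP_def
  set stmtsB := List.flatMap (fun v => v) (PySem.Dict.ofList dict).values with hB_def
  set lines := List.splitOn '\n' cs with hlines_def
  have hlinesne : lines ≠ [] := List.splitOnP_ne_nil _ cs
  have hlen1 : 1 ≤ lines.length := List.length_pos_iff.mpr hlinesne
  have hnlfree : ∀ l ∈ lines, '\n' ∉ l := pv_splitOn_not_mem '\n' cs
  have hjoin' : PySem.Chars.join ['\n'] lines = cs := hjoin
  have hmeminf : ∀ l ∈ lines, l <:+: cs := by
    intro l hm
    have := pv_mem_infix_intercalate (x := '\n') lines l hm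
    rwa [show ['\n'].intercalate lines = PySem.Chars.join ['\n'] lines from rfl, hjoin'] at this
  by_cases hE : stmtsB = []
  · rw [if_pos hE]
    rcases hsc : pvScanA lines (lines.length - 1) with _ | i
    · show String.ofList (PySem.Chars.join ['\n'] lines) = code
      rw [hjoin', hofl]
    · show (if stmtsB.isEmpty = true then String.ofList (PySem.Chars.join ['\n'] lines) else _) = code
      rw [if_pos (by simp [hE]), hjoin', hofl]
  · rw [if_neg hE]
    by_cases hocc : P <:+: cs
    · -- main case: an 'endmodule' line exists and there are statements
      rcases pv_scanA_spec P lines (lines.length - 1) pvScanA (pv_scanA_eq) with ⟨hsc, hall⟩ | ⟨i, hsc, hi_le, hIi, hImax⟩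
      · exfalso
        obtain ⟨l, hm, hl⟩ := pv_infix_intercalate hP lines hlinesne
          (by rwa [show ['\n'].intercalate lines = PySem.Chars.join ['\n'] lines from rfl, hjoin'])
        obtain ⟨i0, hi0, rfl⟩ := List.mem_iff_getElem.mp hm
        have := hall i0 (by omega)
        rw [List.getD_eq_getElem _ _ hi0, (PySem.Chars.isIn_iff_infix P _).mpr hl] at this
        exact Bool.true_eq_false.mp this
      · rcases pv_rfind_spec cs P hPne with ⟨_, hni⟩ | ⟨k, hrf, hkpre, hkmax⟩
        · exact absurd hocc hni
        have hilt : i < lines.length := by omega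
        have hgetD : lines.getD i [] = lines[i] := List.getD_eq_getElem _ _ hilt
        set L := lines[i] with hL_def
        have hPL : P <:+: L := (PySem.Chars.isIn_iff_infix P L).mp (by rw [← hgetD]; exact hIi)
        set X := lines.take i with hX_def
        set Z := lines.drop (i + 1) with hZ_def
        have hdec : lines = X ++ L :: Z := by
          rw [hX_def, hZ_def, hL_def, ← List.drop_eq_getElem_cons hilt, List.take_append_drop]
        have hZlen : Z.length = lines.length - (i + 1) := by rw [hZ_def, List.length_drop]
        have hZ : ∀ l ∈ Z, ¬ P <:+: l := by
          intro l hm hl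
          obtain ⟨j, hj, rfl⟩ := List.mem_iff_getElem.mp hm
          have hjlt : i + 1 + j < lines.length := by omega
          have hgd : Z[j] = lines[i + 1 + j] := List.getElem_drop ..
          have := hImax (i + 1 + j) (by omega) (by omega)
          rw [List.getD_eq_getElem _ _ hjlt, ← hgd, (PySem.Chars.isIn_iff_infix P _).mpr hl] at this
          exact Bool.true_eq_false.mp this
        have hLnl : '\n' ∉ L := hnlfree L (by rw [hL_def]; exact List.getElem_mem hilt)
        set pre := if i = 0 then ([] : List Char) else PySem.Chars.join ['\n'] X ++ ['\n'] with hpre_def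
        set rest := if Z = [] then ([] : List Char) else '\n' :: PySem.Chars.join ['\n'] Z with hrest_def
        have hjLZ : PySem.Chars.join ['\n'] (L :: Z) = L ++ rest := by
          cases hz : Z with
          | nil => rw [PySem.Chars.join_singleton, hrest_def, if_pos hz, List.append_nil]
          | cons z t =>
            rw [PySem.Chars.join_cons_cons, hrest_def, if_neg (by simp [hz]), ← hz]
            simp
        have hXne : i ≠ 0 → X ≠ [] := by
          intro h0 hXeq
          rcases List.take_eq_nil_iff.mp hXeq with h | h
          · exact h0 h
          · exact hlinesne h
        have hsplit : cs = pre ++ (L ++ rest) := by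
          rw [← hjoin', hdec]
          by_cases h0 : i = 0
          · have hX0 : X = [] := by rw [hX_def, h0]; simp
            rw [hX0, hpre_def, if_pos h0, List.nil_append, List.nil_append, hjLZ]
          · have := pv_intercalate_append (x := '\n') X (L :: Z) (hXne h0) (by simp)
            rw [show ∀ p, ['\n'].intercalate p = PySem.Chars.join ['\n'] p from fun _ => rfl,
              show ∀ p, ['\n'].intercalate p = PySem.Chars.join ['\n'] p from fun _ => rfl,
              show ∀ p, ['\n'].intercalate p = PySem.Chars.join ['\n'] p from fun _ => rfl] at this
            rw [this, hjLZ, hpre_def, if_neg h0]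
            simp
        have hPlen : 0 < P.length := by rw [hP_def]; decide
        -- lower bound for k
        obtain ⟨jL, hjL⟩ := (pv_infix_iff_drop P L).mp hPL
        have hjLlt : jL < L.length := by
          by_contra hge
          rw [List.drop_eq_nil_of_le (by omega)] at hjL
          exact hPne (List.prefix_nil.mp hjL)
        have hock : P <+: cs.drop (pre.length + jL) := by
          have h1 : cs.drop (pre.length + jL) = (L ++ rest).drop jL := by
            rw [hsplit, List.drop_append, List.drop_eq_nil_of_le (by omega), List.nil_append]
            congr 1
            omega
          rw [h1, List.drop_append_of_le_length (by omega)]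
          exact hjL.trans (List.prefix_append _ _)
        have hk1 : pre.length + jL ≤ k := hkmax _ hock
        -- upper bound for k
        have hk2 : k + P.length ≤ pre.length + L.length := by
          by_cases hkle : k ≤ pre.length + L.length
          · have h1 : cs.drop k = L.drop (k - pre.length) ++ rest := by
              rw [hsplit, List.drop_append, List.drop_eq_nil_of_le (by omega), List.nil_append,
                List.drop_append_of_le_length (by omega)]
            rw [h1] at hkpre
            cases hz : Z with
            | nil =>
              rw [hrest_def, if_pos hz, List.append_nil] at hkpre
              have := hkpre.length_le
              rw [List.length_drop] at this
              omega
            | cons z t =>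
              rw [hrest_def, if_neg (by simp [hz])] at hkpre
              have := (pv_prefix_append_cons hP hkpre).length_le
              rw [List.length_drop] at this
              omega
          · exfalso
            cases hz : Z with
            | nil =>
              have hcl : cs.length = pre.length + L.length := by
                rw [hsplit, hrest_def, if_pos hz]
                simp
              rw [List.drop_eq_nil_of_le (by omega)] at hkpre
              exact hPne (List.prefix_nil.mp hkpre)
            | cons z t =>
              have hrw : rest = '\n' :: PySem.Chars.join ['\n'] Z := by
                rw [hrest_def, if_neg (by simp [hz])]
              have h1 : cs.drop k
                  = (PySem.Chars.join ['\n'] Z).drop (k - pre.length - L.length - 1) := by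
                rw [hsplit, hrw, show pre ++ (L ++ '\n' :: PySem.Chars.join ['\n'] Z)
                    = (pre ++ L) ++ '\n' :: PySem.Chars.join ['\n'] Z by simp,
                  List.drop_append, List.drop_eq_nil_of_le (by simp; omega), List.nil_append]
                have h2 : k - (pre ++ L).length = (k - pre.length - L.length - 1) + 1 := by
                  simp; omega
                rw [h2, List.drop_succ_cons]
              rw [h1] at hkpre
              have hinZ : P <:+: PySem.Chars.join ['\n'] Z :=
                (pv_infix_iff_drop _ _).mpr ⟨_, hkpre⟩
              obtain ⟨l, hm, hl⟩ := pv_infix_intercalate hP Z (by simp [hz]) hinZ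
              exact hZ l hm hl
        -- the newline rfind before position k
        have hm_def : k - pre.length ≤ L.length := by omega
        have hT : cs.take k = pre ++ L.take (k - pre.length) := by
          rw [hsplit, List.take_append, List.take_of_length_le (by omega)]
          congr 1
          rw [List.take_append, show k - pre.length - L.length = 0 from Nat.sub_eq_zero_of_le hm_def,
            List.take_zero, List.append_nil]
        have hr : PySem.Chars.rfind (cs.take k) ['\n']
            = if i = 0 then -1 else ((PySem.Chars.join ['\n'] X).length : Int) := by
          rcases pv_rfind_spec (cs.take k) ['\n'] (by simp) with ⟨he, hni⟩ | ⟨k', he, hp, hmax⟩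
          · rw [he]
            by_cases h0 : i = 0
            · rw [if_pos h0]
            · exfalso
              apply hni
              rw [hT, hpre_def, if_neg h0]
              refine (pv_infix_iff_drop _ _).mpr ⟨(PySem.Chars.join ['\n'] X).length, ?_⟩
              rw [List.append_assoc, List.cons_append, List.drop_left]
              exact ⟨_, rfl⟩
          · rw [he]
            by_cases h0 : i = 0
            · exfalso
              have hmem : '\n' ∈ cs.take k := by
                have := hp
                cases hq : (cs.take k).drop k' with
                | nil => rw [hq] at this; exact absurd (List.prefix_nil.mp this) (by simp)
                | cons a t =>
                  rw [hq] at this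
                  obtain ⟨u, hu⟩ := this
                  have ha : a = '\n' := by
                    have := hu
                    simp only [List.cons_append] at this
                    exact (List.cons.inj this.symm).1
                  subst ha
                  exact List.mem_of_mem_drop (show '\n' ∈ (cs.take k).drop k' by
                    rw [hq]; exact List.mem_cons_self)
              rw [hT, hpre_def, if_pos h0, List.nil_append] at hmem
              exact hLnl (List.mem_of_mem_take hmem)
            · rw [if_neg h0]
              have hrw : cs.take k = PySem.Chars.join ['\n'] X ++ '\n' :: L.take (k - pre.length) := by
                rw [hT, hpre_def, if_neg h0]
                simp
              have hk'ge : (PySem.Chars.join ['\n'] X).length ≤ k' := by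
                refine hmax _ ?_
                rw [hrw, List.drop_left]
                exact ⟨_, rfl⟩
              have hk'le : k' ≤ (PySem.Chars.join ['\n'] X).length := by
                by_contra hgt
                rw [hrw] at hp
                have h1 : (PySem.Chars.join ['\n'] X ++ '\n' :: L.take (k - pre.length)).drop k'
                    = (L.take (k - pre.length)).drop (k' - (PySem.Chars.join ['\n'] X).length - 1) := by
                  rw [List.drop_append, List.drop_eq_nil_of_le (by omega), List.nil_append]
                  have h2 : k' - (PySem.Chars.join ['\n'] X).length
                      = (k' - (PySem.Chars.join ['\n'] X).length - 1) + 1 := by omega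
                  rw [h2, List.drop_succ_cons]
                  congr 1
                rw [h1] at hp
                have : '\n' ∈ L.take (k - pre.length) := by
                  cases hq : (L.take (k - pre.length)).drop (k' - (PySem.Chars.join ['\n'] X).length - 1) with
                  | nil => rw [hq] at hp; exact absurd (List.prefix_nil.mp hp) (by simp)
                  | cons a t =>
                    rw [hq] at hp
                    obtain ⟨u, hu⟩ := hp
                    have ha : a = '\n' := by
                      simp only [List.cons_append] at hu
                      exact (List.cons.inj hu.symm).1
                    subst ha
                    exact List.mem_of_mem_drop (show '\n' ∈ (L.take (k - pre.length)).drop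
                        (k' - (PySem.Chars.join ['\n'] X).length - 1) by
                      rw [hq]; exact List.mem_cons_self)
                exact hLnl (List.mem_of_mem_take this)
              congr 1
              omega
        have hpre_len : pre.length = if i = 0 then 0 else (PySem.Chars.join ['\n'] X).length + 1 := by
          by_cases h0 : i = 0
          · rw [if_pos h0, hpre_def, if_pos h0]; rfl
          · rw [if_neg h0, hpre_def, if_neg h0]; simp
        have hkcs : (k : Int) < (cs.length : Int) := by
          have : pre.length + L.length ≤ cs.length := by
            rw [hsplit]; simp
          omega
        have hls : (PySem.Chars.rfindFrom cs ['\n'] 0 (some ((k : Nat) : Int)) + 1).toNat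
            = pre.length := by
          rw [PySem.Chars.rfindFrom]
          norm_num
          simp only [if_neg (show ¬ cs.length < k from by omega),
            if_neg (show ¬ ((k : Int) < 0) from by omega), Int.toNat_natCast]
          rw [hr]
          by_cases h0 : i = 0
          · norm_num [h0, hpre_len]
          · simp only [if_neg h0]
            rw [if_neg (by omega), hpre_len, if_neg h0]
            omega
        rw [hrf, if_neg (by omega), hls]
        -- select the some-branch of A and remove its isEmpty test
        rw [hsc]
        show (if stmtsB.isEmpty = true then _ else _) = _
        rw [if_neg (by simp [hE])]
        -- indent on both sides
        have htake : cs.take pre.length = pre := by rw [hsplit, List.take_left]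
        have hdropp : cs.drop pre.length = L ++ rest := by rw [hsplit, List.drop_left]
        have heL : 'e' ∈ L := hPL.subset (by rw [hP_def]; decide)
        have hindB : (cs.drop pre.length).takeWhile
              (fun c => decide (c ∈ [' ', '\t', '\x0d', '\x0b', '\x0c']))
            = L.takeWhile PySem.Chars.isspace := by
          rw [hdropp, pv_takeWhile_append_left rest ⟨'e', heL, by decide⟩]
          apply pv_takeWhile_congr
          intro c hc
          have hcdom : pvDomChar c = true := by
            have hccs : c ∈ cs := (hmeminf L (hL_def ▸ List.getElem_mem hilt)).subset hc
            have := hdom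
            rw [pvDomStr, List.all_eq_true] at this
            exact this c hccs
          exact pv_ws_char_eq c hcdom (fun hceq => hLnl (hceq ▸ hc))
        have hindA : L.take (L.length - (PySem.Chars.lstrip L).length)
            = L.takeWhile PySem.Chars.isspace := pv_indent_eq L
        rw [hgetD, hindA, hindB]
        -- final assembly
        congr 1
        rw [htake, hdropp, hdec]
        set ind := L.takeWhile PySem.Chars.isspace with hind_def
        set ins := [ind ++ "always @(*) begin".toList]
          ++ stmtsB.map (fun stmt => ind ++ "    ".toList ++ stmt.toList)
          ++ [ind ++ "end".toList, []] with hins_def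
        have htX : (X ++ L :: Z).take i = X := by
          rw [← hdec, hX_def]
        have hdX : (X ++ L :: Z).drop i = L :: Z := by
          have hXlen : X.length = i := by
            rw [hX_def, List.length_take]
            omega
          rw [← hXlen, List.drop_left]
        rw [htX, hdX]
        have hblock : PySem.Chars.join ['\n'] ins ++ ['\n']
            = ind ++ "always @(*) begin\n".toList
              ++ stmtsB.flatMap (fun s => ind ++ "    ".toList ++ s.toList ++ ['\n'])
              ++ ind ++ "end\n\n".toList := by
          rw [hins_def]
          exact pv_block ind stmtsB
        have hinsne : ins ≠ [] := by rw [hins_def]; simp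
        by_cases h0 : i = 0
        · have hX0 : X = [] := by rw [hX_def, h0]; simp
          rw [hX0, List.nil_append, hpre_def, if_pos h0, List.nil_append]
          have := pv_intercalate_append (x := '\n') ins (L :: Z) hinsne (by simp)
          rw [show ∀ p, ['\n'].intercalate p = PySem.Chars.join ['\n'] p from fun _ => rfl,
            show ∀ p, ['\n'].intercalate p = PySem.Chars.join ['\n'] p from fun _ => rfl,
            show ∀ p, ['\n'].intercalate p = PySem.Chars.join ['\n'] p from fun _ => rfl] at this
          rw [this, hjLZ, ← hblock]
          simp
        · have := pv_intercalate_append (x := '\n') X (ins ++ L :: Z) (hXne h0) (by simp [hinsne])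
          rw [show ∀ p, ['\n'].intercalate p = PySem.Chars.join ['\n'] p from fun _ => rfl,
            show ∀ p, ['\n'].intercalate p = PySem.Chars.join ['\n'] p from fun _ => rfl,
            show ∀ p, ['\n'].intercalate p = PySem.Chars.join ['\n'] p from fun _ => rfl] at this
          rw [List.append_assoc, this]
          have h2 := pv_intercalate_append (x := '\n') ins (L :: Z) hinsne (by simp)
          rw [show ∀ p, ['\n'].intercalate p = PySem.Chars.join ['\n'] p from fun _ => rfl,
            show ∀ p, ['\n'].intercalate p = PySem.Chars.join ['\n'] p from fun _ => rfl,
            show ∀ p, ['\n'].intercalate p = PySem.Chars.join ['\n'] p from fun _ => rfl] at h2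
          rw [h2, hjLZ, hpre_def, if_neg h0, ← hblock]
          simp
    · -- statements but no 'endmodule' anywhere
      rcases pv_rfind_spec cs P hPne with ⟨hrf, _⟩ | ⟨k, hrf, hkpre, _⟩
      · rw [hrf, if_pos rfl]
        rcases pv_scanA_spec P lines (lines.length - 1) pvScanA (pv_scanA_eq) with ⟨hsc, hall⟩ | ⟨i, hsc, hi_le, hIi, hImax⟩
        · rw [hsc]
          show String.ofList (PySem.Chars.join ['\n'] lines) = code
          rw [hjoin', hofl]
        · exfalso
          have hilt : i < lines.length := by omega
          rw [List.getD_eq_getElem _ _ hilt] at hIi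
          have := (PySem.Chars.isIn_iff_infix P _).mp hIi
          exact hocc (this.trans (hmeminf _ (List.getElem_mem hilt)))
      · exfalso
        exact hocc (((pv_infix_iff_drop P cs).mpr ⟨k, hkpre⟩))

-- ===== VERDICT (by name: the statement is the Claim_ definition above) =====
theorem insert_resultp_statements_spec : Claim_equal_insert_resultp_statements := by
  intro code dict hdom
  have hc : pvDomStr code = true := by
    have := hdom
    unfold Dom_insert_resultp_statements at this
    simp only [Bool.and_eq_true] at this
    exact this.1
  exact pv_main code dict hc
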